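-- pv_equiv track=rewrite | github.com/itmoon7/onconpc | codes/utils2.py | partition_feature_names_by_group
-- ===== SOURCE A (Python) =====
-- from typing import List, Mapping, Optional, Any, Tuple
-- import collections
--
-- def partition_feature_names_by_group(fature_names: List[str]):
-- 	"""Partitions feature names into groups.
--
-- 	Args:
-- 		feature_names: List of feature names.
-- 	Returns:
-- 		Dictionary mapping feature groups to feature names.
-- 	"""
-- 	feature_group_to_features_dict = collections.defaultdict(list)
-- 	feature_to_feature_group_dict = {}
-- 	for feat in fature_names:
-- 		if 'SBS' in feat:
-- 			feature_group_to_features_dict['signature'].append(feat)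
-- 			feature_to_feature_group_dict[feat] = 'signature'
-- 		elif feat in ['Age', 'Sex']:
-- 			feature_group_to_features_dict['clinical'].append(feat)
-- 			feature_to_feature_group_dict[feat] = 'clinical'
-- 		elif 'CNA' in feat:
-- 			feature_group_to_features_dict['cna'].append(feat)
-- 			feature_to_feature_group_dict[feat] = 'cna'
-- 		else:
-- 			feature_group_to_features_dict['mutation'].append(feat)
-- 			feature_to_feature_group_dict[feat] = 'mutation'
-- 	return feature_group_to_features_dict, feature_to_feature_group_dict
-- ===== SOURCE B (Python) =====
-- import collections
--
-- def partition_feature_names_by_group(fature_names):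
--     rules = (('signature', lambda f: 'SBS' in f),
--              ('clinical', lambda f: f in ('Age', 'Sex')),
--              ('cna', lambda f: 'CNA' in f),
--              ('mutation', lambda f: True))
--     groups = [next(g for g, p in rules if p(f)) for f in fature_names]
--     feature_to_feature_group_dict = dict(zip(fature_names, groups))
--     feature_group_to_features_dict = collections.defaultdict(list)
--     for g in dict.fromkeys(groups):
--         feature_group_to_features_dict[g] = [f for f, gg in zip(fature_names, groups)
--                                              if gg == g]
--     return feature_group_to_features_dict, feature_to_feature_group_dict
-- ===== Notes on version B (the rewrite author's own statement) =====
-- stated objective: alternative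
-- what changed: B is group-major instead of element-major: it classifies via a (group, predicate) rules table, pairs names with their groups once, builds the lookup dict as dict(zip(...)), and assembles the grouped dict by iterating the DISTINCT groups in first-occurrence order and filtering the zipped list per group, instead of A's single loop appending into both dicts branch by branch.
import Mathlib
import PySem

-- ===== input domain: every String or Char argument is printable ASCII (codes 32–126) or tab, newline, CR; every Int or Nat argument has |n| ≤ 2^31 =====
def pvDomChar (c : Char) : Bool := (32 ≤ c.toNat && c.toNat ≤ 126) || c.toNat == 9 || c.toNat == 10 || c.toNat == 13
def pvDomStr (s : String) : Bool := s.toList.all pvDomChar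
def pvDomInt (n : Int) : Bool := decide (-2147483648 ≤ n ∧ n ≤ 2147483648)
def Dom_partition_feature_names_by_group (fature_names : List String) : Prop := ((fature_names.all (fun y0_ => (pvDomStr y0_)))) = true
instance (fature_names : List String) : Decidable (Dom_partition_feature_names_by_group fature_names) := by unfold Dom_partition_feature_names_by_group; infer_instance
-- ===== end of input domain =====

-- B is group-major instead of element-major: it classifies via a rules table, then builds each
-- group's member list by filtering the whole input per distinct group (first-occurrence order),
-- instead of A's single loop appending into both dicts branch by branch; objective: alternative.


-- ===== PORT A =====
-- one loop, updating both dicts branch by branch (defaultdict append = modify with default [])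
def partition_feature_names_by_group (fature_names : List String) : (List (String × List String)) × (List (String × String)) :=
  let st := fature_names.foldl
    (fun (st : PySem.Dict String (List String) × PySem.Dict String String) feat =>
      if PySem.Str.isIn "SBS" feat then
        (st.1.modify "signature" [] (· ++ [feat]), st.2.insert feat "signature")
      else if feat ∈ ["Age", "Sex"] then
        (st.1.modify "clinical" [] (· ++ [feat]), st.2.insert feat "clinical")
      else if PySem.Str.isIn "CNA" feat then
        (st.1.modify "cna" [] (· ++ [feat]), st.2.insert feat "cna")
      else
        (st.1.modify "mutation" [] (· ++ [feat]), st.2.insert feat "mutation"))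
    (PySem.Dict.empty, PySem.Dict.empty)
  (st.1.items, st.2.items)

-- ===== PORT B =====
-- the rules table (group name, predicate) of Source B
def pvRules : List (String × (String → Bool)) :=
  [("signature", fun f => PySem.Str.isIn "SBS" f),
   ("clinical", fun f => decide (f ∈ ["Age", "Sex"])),
   ("cna", fun f => PySem.Str.isIn "CNA" f),
   ("mutation", fun _ => true)]

-- next(g for g, p in rules if p(f)); the last predicate is always true, so find? is
-- always some and the "" default is unreachable
def pvClassify (feat : String) : String :=
  ((pvRules.find? (fun r => r.2 feat)).map (·.1)).getD ""

-- groups computed once; dict(zip(names, groups)); then one insert per DISTINCT group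
-- (dict.fromkeys order = PySem.List.dedup), its value a filter of the zipped list
def partition_feature_names_by_group_alt (fature_names : List String) : (List (String × List String)) × (List (String × String)) :=
  let groups := fature_names.map pvClassify
  let m := (fature_names.zip groups).foldl
    (fun (d : PySem.Dict String String) p => d.insert p.1 p.2) PySem.Dict.empty
  let g := (PySem.List.dedup groups).foldl
    (fun (d : PySem.Dict String (List String)) gr =>
      d.insert gr (((fature_names.zip groups).filter (fun p => p.2 == gr)).map (·.1)))
    PySem.Dict.empty
  (g.items, m.items)

-- ===== PRECONDITION & SPEC =====
def Spec_partition_feature_names_by_group (fature_names : List String) (out : (List (String × List String)) × (List (String × String))) : Prop := out = partition_feature_names_by_group_alt fature_names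
instance (fature_names : List String) (out : (List (String × List String)) × (List (String × String))) : Decidable (Spec_partition_feature_names_by_group fature_names out) := by unfold Spec_partition_feature_names_by_group; infer_instance

-- ===== CLAIM =====
def Claim_equal_partition_feature_names_by_group : Prop := ∀ (fature_names : List String), Dom_partition_feature_names_by_group fature_names → Spec_partition_feature_names_by_group fature_names (partition_feature_names_by_group fature_names)

-- ===== LEMMAS AND PROOFS =====

-- A's branch chain, as a function (proof-side name for A's classification)
def pvChain (feat : String) : String :=
  if PySem.Str.isIn "SBS" feat then "signature"
  else if feat ∈ ["Age", "Sex"] then "clinical"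
  else if PySem.Str.isIn "CNA" feat then "cna"
  else "mutation"

-- B's table lookup computes A's branch chain
lemma classify_eq_chain (f : String) : pvClassify f = pvChain f := by
  unfold pvClassify pvChain pvRules
  cases h1 : PySem.Str.isIn "SBS" f <;>
    cases h2 : decide (f ∈ ["Age", "Sex"]) <;>
      cases h3 : PySem.Str.isIn "CNA" f <;>
        simp_all [List.find?]

-- zipping a list with its own map is mapping to pairs
lemma zip_map_self {α β : Type} (c : α → β) (l : List α) :
    l.zip (l.map c) = l.map (fun x => (x, c x)) := by
  induction l with
  | nil => rfl
  | cons x l ih => simp [ih]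

-- the two filter shapes pick the same sublist
lemma filter_shape (c : String → String) (l : List String) (g : String) :
    ((l.map (fun f => (c f, f))).filter (fun p => p.1 == g)).map (·.2) =
      ((l.map (fun f => (f, c f))).filter (fun p => p.2 == g)).map (·.1) := by
  induction l with
  | nil => rfl
  | cons x l ih =>
      simp only [List.map_cons, List.filter_cons]
      by_cases h : c x == g <;> simp [h, ih]

-- ===== VERDICT =====
theorem partition_feature_names_by_group_spec : Claim_equal_partition_feature_names_by_group := by
  intro names _
  unfold Spec_partition_feature_names_by_group
  unfold partition_feature_names_by_group partition_feature_names_by_group_alt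
  have hfun : pvClassify = pvChain := funext classify_eq_chain
  simp only [hfun, zip_map_self]
  -- A's paired loop is two independent loops over pvChain
  have hsplit :
      names.foldl
        (fun (st : PySem.Dict String (List String) × PySem.Dict String String) feat =>
          if PySem.Str.isIn "SBS" feat then
            (st.1.modify "signature" [] (· ++ [feat]), st.2.insert feat "signature")
          else if feat ∈ ["Age", "Sex"] then
            (st.1.modify "clinical" [] (· ++ [feat]), st.2.insert feat "clinical")
          else if PySem.Str.isIn "CNA" feat then
            (st.1.modify "cna" [] (· ++ [feat]), st.2.insert feat "cna")
          else
            (st.1.modify "mutation" [] (· ++ [feat]), st.2.insert feat "mutation"))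
        (PySem.Dict.empty, PySem.Dict.empty) =
      (names.foldl (fun (d : PySem.Dict String (List String)) feat =>
          d.modify (pvChain feat) [] (· ++ [feat])) PySem.Dict.empty,
       names.foldl (fun (d : PySem.Dict String String) feat =>
          d.insert feat (pvChain feat)) PySem.Dict.empty) := by
    rw [← PySem.List.foldl_prod_mk
      (f := fun (d : PySem.Dict String (List String)) feat =>
          d.modify (pvChain feat) [] (· ++ [feat]))
      (g := fun (d : PySem.Dict String String) feat => d.insert feat (pvChain feat))]
    apply PySem.List.foldl_congr_mem
    intro acc x _
    unfold pvChain
    split_ifs <;> rfl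
  rw [hsplit, Prod.mk.injEq]
  constructor
  · -- grouped dict: A's element-major modify-loop vs B's group-major insert-loop
    have hA : names.foldl (fun (d : PySem.Dict String (List String)) feat =>
          d.modify (pvChain feat) [] (· ++ [feat])) PySem.Dict.empty =
        (names.map (fun f => (pvChain f, f))).foldl
          (fun (d : PySem.Dict String (List String)) p => d.modify p.1 [] (· ++ [p.2]))
          PySem.Dict.empty := by
      rw [List.foldl_map]
    have hnd : ((names.map (fun f => (pvChain f, f))).foldl
          (fun (d : PySem.Dict String (List String)) p => d.modify p.1 [] (· ++ [p.2]))
          PySem.Dict.empty).keys.Nodup := by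
      rw [List.foldl_map]
      exact PySem.Dict.nodup_keys_foldl_modify_key names pvChain [] _ _
        PySem.Dict.nodup_keys_empty
    have hkeys : ((names.map (fun f => (pvChain f, f))).foldl
          (fun (d : PySem.Dict String (List String)) p => d.modify p.1 [] (· ++ [p.2]))
          PySem.Dict.empty).keys = PySem.List.dedup (names.map pvChain) := by
      rw [List.foldl_map]
      rw [PySem.Dict.keys_foldl_modify_key]
      simp [PySem.List.dedup_eq_ofList, PySem.Set.ofList_eq_foldl, PySem.Set.update]
    rw [hA, PySem.Dict.items_eq_map_keys _ hnd [], hkeys]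
    rw [PySem.Dict.items_foldl_insert_fresh (PySem.List.dedup (names.map pvChain))
      (fun g => g)
      (fun gr => ((names.map (fun x => (x, pvChain x))).filter (fun p => p.2 == gr)).map (·.1))
      PySem.Dict.empty
      (by intro a _; exact PySem.Dict.contains_empty a)
      (by simp)]
    simp only [PySem.Dict.empty, List.nil_append]
    apply List.map_congr_left
    intro g _
    rw [PySem.Dict.getD_foldl_modify_append]
    simp [filter_shape pvChain names g, PySem.Dict.getD, PySem.Dict.get?]
  · -- lookup dict: dict(zip) vs A's per-element insert
    rw [List.foldl_map]
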